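-- pv_equiv track=rewrite | github.com/PremavCSU/Python---HackerRank | test1.py | nearest_larger
-- ===== SOURCE A (Python) =====
-- def nearest_larger(arr):
--     n = len(arr)
--     result = [-1] * n
--
--     for i in range(n):
--         left_dist = float('inf')
--         right_dist = float('inf')
--
--         # Look left
--         for j in range(i - 1, -1, -1):
--             if arr[j] > arr[i]:
--                 left_dist = i - j
--                 break
--
--         # Look right
--         for j in range(i + 1, n):
--             if arr[j] > arr[i]:
--                 right_dist = j - i
--                 break
--
--         # Tie-breaker logic: pick left if dist is same or smaller
--         if left_dist <= right_dist and left_dist != float('inf'):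
--             result[i] = arr[i - left_dist]
--         elif right_dist != float('inf'):
--             result[i] = arr[i + right_dist]
--
--     return result
-- ===== SOURCE B (Python) =====
-- def _prev_greater_idx(arr):
--     # index of nearest strictly-greater element to the left, via a monotonic stack; None if none
--     out = []
--     stack = []
--     for i, x in enumerate(arr):
--         while stack and arr[stack[-1]] <= x:
--             stack.pop()
--         out.append(stack[-1] if stack else None)
--         stack.append(i)
--     return out
--
-- def nearest_larger(arr):
--     n = len(arr)
--     left = _prev_greater_idx(arr)
--     rev = _prev_greater_idx(arr[::-1])
--     right = [None if rev[n - 1 - i] is None else n - 1 - rev[n - 1 - i] for i in range(n)]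
--     res = []
--     for i in range(n):
--         l, r = left[i], right[i]
--         if l is not None and (r is None or i - l <= r - i):
--             res.append(arr[l])
--         elif r is not None:
--             res.append(arr[r])
--         else:
--             res.append(-1)
--     return res
-- ===== Notes on version B (the rewrite author's own statement) =====
-- stated objective: faster
-- what changed: Replaced A's per-element leftward and rightward linear scans by two monotonic-stack passes (one over the array, one over its reversal) that compute the nearest strictly-greater neighbor indices for all positions at once, then a single pass applies the same left-on-tie rule.
import Mathlib
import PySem

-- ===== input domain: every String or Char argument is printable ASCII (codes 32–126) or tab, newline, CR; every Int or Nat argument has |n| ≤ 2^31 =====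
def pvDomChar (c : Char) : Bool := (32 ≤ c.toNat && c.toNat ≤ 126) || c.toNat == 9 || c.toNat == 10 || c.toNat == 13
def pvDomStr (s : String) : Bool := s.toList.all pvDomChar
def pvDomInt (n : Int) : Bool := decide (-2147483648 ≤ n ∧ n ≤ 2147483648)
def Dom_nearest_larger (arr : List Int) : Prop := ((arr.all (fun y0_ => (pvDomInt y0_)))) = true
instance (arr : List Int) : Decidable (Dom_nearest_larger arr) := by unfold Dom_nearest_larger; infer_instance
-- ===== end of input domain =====

-- B replaces A's per-element two-sided scans by two monotonic-stack passes; identical return values.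

-- ===== PORT A =====
-- A's inner left loop: for j in range(i-1,-1,-1): if arr[j] > arr[i]: left_dist = i-j; break
def nlLeftDist (arr : List Int) (xi : Int) (i : Int) : List Int → Option Int
  | [] => none
  | j :: rest =>
      if xi < PySem.List.pyGetD arr j 0 then some (i - j) else nlLeftDist arr xi i rest

-- A's inner right loop: for j in range(i+1,n): if arr[j] > arr[i]: right_dist = j-i; break
def nlRightDist (arr : List Int) (xi : Int) (i : Int) : List Int → Option Int
  | [] => none
  | j :: rest =>
      if xi < PySem.List.pyGetD arr j 0 then some (j - i) else nlRightDist arr xi i rest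

-- A's loop body for one i (left/right scans, then the inf-aware tie-breaker);
-- left_dist/right_dist = float('inf') is the `none` case of the Option
def nlResultAt (arr : List Int) (i : Int) : Int :=
  let xi := PySem.List.pyGetD arr i 0
  let ld := nlLeftDist arr xi i (PySem.List.pyRange (i - 1) (-1) (-1))
  let rd := nlRightDist arr xi i (PySem.List.pyRange (i + 1) (arr.length : Int) 1)
  match ld, rd with
  | some l, some r =>
      if l ≤ r then PySem.List.pyGetD arr (i - l) 0 else PySem.List.pyGetD arr (i + r) 0
  | some l, none => PySem.List.pyGetD arr (i - l) 0
  | none, some r => PySem.List.pyGetD arr (i + r) 0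
  | none, none => -1

def nearest_larger (arr : List Int) : List Int :=
  (PySem.List.pyRange 0 (arr.length : Int) 1).map (fun i => nlResultAt arr i)

-- ===== PORT B =====
-- Source B _prev_greater_idx loop: pop while arr[stack[-1]] <= x, record top (None if empty), push i
def pgGo (arr : List Int) : List Int → Nat → List Nat → List (Option Nat)
  | [], _, _ => []
  | x :: rest, i, stack =>
      let stack' := stack.dropWhile (fun j => decide (arr.getD j 0 ≤ x))
      stack'.head? :: pgGo arr rest (i + 1) (i :: stack')

def prevGreaterIdx (arr : List Int) : List (Option Nat) := pgGo arr arr 0 []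

def nearest_larger_alt (arr : List Int) : List Int :=
  let n := arr.length
  let left := prevGreaterIdx arr
  let rev := prevGreaterIdx arr.reverse
  let right := (List.range n).map (fun i =>
    match rev.getD (n - 1 - i) none with
    | none => none
    | some j => some (n - 1 - j))
  (List.range n).map (fun i =>
    match left.getD i none with
    | some l =>
        match right.getD i none with
        | none => arr.getD l 0
        | some r => if i - l ≤ r - i then arr.getD l 0 else arr.getD r 0
    | none =>
        match right.getD i none with
        | some r => arr.getD r 0
        | none => -1)

-- ===== PRECONDITION & SPEC =====
def Spec_nearest_larger (arr : List Int) (out : List Int) : Prop := out = nearest_larger_alt arr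
instance (arr : List Int) (out : List Int) : Decidable (Spec_nearest_larger arr out) := by unfold Spec_nearest_larger; infer_instance

-- ===== CLAIM (what is proved, stated in full; the proofs are below) =====
def Claim_equal_nearest_larger : Prop := ∀ (arr : List Int), Dom_nearest_larger arr → Spec_nearest_larger arr (nearest_larger arr)

-- ===== LEMMAS AND PROOFS =====

-- value at a Nat index
def nlA (arr : List Int) (j : Nat) : Int := arr.getD j 0

-- index of the nearest strictly-larger value scanning left (descending) / right (ascending)
def findL (arr : List Int) (i : Nat) : Option Nat :=
  ((List.range i).reverse).find? (fun j => decide (nlA arr i < nlA arr j))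
def findR (arr : List Int) (i : Nat) : Option Nat :=
  (List.range' (i + 1) (arr.length - (i + 1))).find? (fun j => decide (nlA arr i < nlA arr j))

-- "j is visible from i": nothing in (j, i) reaches arr[j]
def visB (arr : List Int) (i j : Nat) : Bool :=
  decide (∀ k < i, j < k → nlA arr k < nlA arr j)

-- what B's stack holds just before index i is processed
def stackChar (arr : List Int) (i : Nat) : List Nat :=
  ((List.range i).reverse).filter (visB arr i)

-- the per-index value both programs compute (the common specification)
def nlEntry (arr : List Int) (i : Nat) : Int :=
  match findL arr i with
  | some l =>
      match findR arr i with
      | none => arr.getD l 0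
      | some r => if i - l ≤ r - i then arr.getD l 0 else arr.getD r 0
  | none =>
      match findR arr i with
      | some r => arr.getD r 0
      | none => -1

-- generic: filter = dropWhile of the complement when truth of p propagates down the list
theorem filter_eq_dropWhile_of_pairwise {α : Type} {p : α → Bool} {l : List α}
    (h : l.Pairwise (fun x y => p x = true → p y = true)) :
    l.filter p = l.dropWhile (fun x => !p x) := by
  induction l with
  | nil => rfl
  | cons x xs ih =>
      rcases List.pairwise_cons.mp h with ⟨hx, hxs⟩
      by_cases hp : p x = true
      · simp [List.dropWhile_cons, hp, List.filter_eq_self.mpr (fun y hy => hx y hy hp)]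
      · simp [List.dropWhile_cons, hp, ih hxs]

-- generic: filtering cannot change find? when the found element passes the filter
theorem find?_filter_of_first {α : Type} {p q : α → Bool} (l : List α)
    (h : ∀ x, l.find? q = some x → p x = true) :
    (l.filter p).find? q = l.find? q := by
  induction l with
  | nil => rfl
  | cons x xs ih =>
      by_cases hq : q x = true
      · have hp : p x = true := h x (by simp [List.find?_cons, hq])
        simp [hp, List.find?_cons, hq]
      · have h' : ∀ y, xs.find? q = some y → p y = true := by
          intro y hy; exact h y (by simp [List.find?_cons, hq, hy])
        by_cases hp : p x = true
        · simp [hp, List.find?_cons, hq, ih h']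
        · simp [hp, List.find?_cons, hq, ih h']

-- generic: find? only depends on the predicate's values on the list
theorem find?_congr_mem {α : Type} {p q : α → Bool} {l : List α}
    (h : ∀ x ∈ l, p x = q x) : l.find? p = l.find? q := by
  induction l with
  | nil => rfl
  | cons x xs ih =>
      rw [List.find?_cons, List.find?_cons, h x List.mem_cons_self,
        ih (fun y hy => h y (List.mem_cons_of_mem x hy))]

theorem findL_lt (arr : List Int) (i : Nat) {l : Nat} (h : findL arr i = some l) : l < i := by
  have := List.mem_of_find?_eq_some h
  simp only [List.mem_reverse, List.mem_range] at this; exact this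

theorem findR_bounds (arr : List Int) (i : Nat) {r : Nat} (h : findR arr i = some r) :
    i < r ∧ r < arr.length := by
  have := List.mem_of_find?_eq_some h
  simp only [List.mem_range'] at this; omega

-- the first (largest) left index with a larger value is visible
theorem findL_visible (arr : List Int) (i : Nat) {j : Nat} (h : findL arr i = some j) :
    visB arr i j = true := by
  rcases List.find?_eq_some_iff_append.mp h with ⟨hq, as, bs, hsplit, has⟩
  simp only [decide_eq_true_eq] at hq
  simp only [visB, decide_eq_true_eq]
  intro k hk hjk
  have hkmem : k ∈ (List.range i).reverse := by simp [List.mem_reverse, List.mem_range, hk]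
  rw [hsplit] at hkmem
  have hkas : k ∈ as := by
    rcases List.mem_append.mp hkmem with h1 | h2
    · exact h1
    · rcases List.mem_cons.mp h2 with rfl | hbs
      · omega
      · exfalso
        have hpw : ((List.range i).reverse).Pairwise (fun a b => b < a) := by
          rw [List.pairwise_reverse]
          exact List.pairwise_lt_range
        rw [hsplit] at hpw
        have hjk' := (List.pairwise_cons.mp ((List.pairwise_append.mp hpw).2.1)).1 k hbs
        omega
  have hkq := has k hkas
  simp only [Bool.not_eq_eq_eq_not, Bool.not_true, decide_eq_false_iff_not, not_lt] at hkq
  omega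

-- the stack is strictly increasing in value from top to bottom
theorem stackChar_pairwise (arr : List Int) (i : Nat) :
    (stackChar arr i).Pairwise (fun j1 j2 => nlA arr j1 < nlA arr j2) := by
  have hpw : ((List.range i).reverse).Pairwise (fun a b => b < a) := by
    rw [List.pairwise_reverse]; exact List.pairwise_lt_range
  have h2 : (stackChar arr i).Pairwise (fun j1 j2 => j2 < j1) := hpw.filter _
  have hmem : ∀ j ∈ stackChar arr i, visB arr i j = true ∧ j < i := by
    intro j hj
    have hm := List.mem_filter.mp hj
    refine ⟨hm.2, ?_⟩
    have := hm.1; simp only [List.mem_reverse, List.mem_range] at this; exact this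
  refine List.Pairwise.imp_of_mem ?_ h2
  intro j1 j2 h1 h2' hlt
  rcases hmem j1 h1 with ⟨hv1, hi1⟩
  rcases hmem j2 h2' with ⟨hv2, hi2⟩
  simp only [visB, decide_eq_true_eq] at hv2
  exact hv2 j1 hi1 hlt

-- one step of the stack recurrence
theorem stackChar_succ (arr : List Int) (i : Nat) :
    stackChar arr (i + 1) =
      i :: (stackChar arr i).dropWhile (fun j => decide (nlA arr j ≤ nlA arr i)) := by
  have hrev : (List.range (i+1)).reverse = i :: (List.range i).reverse := by
    rw [List.range_succ]; simp
  have hvi : visB arr (i+1) i = true := by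
    simp only [visB, decide_eq_true_eq]; intro k hk hik; omega
  have hpt : ∀ j ∈ (List.range i).reverse,
      visB arr (i+1) j = (decide (nlA arr i < nlA arr j) && visB arr i j) := by
    intro j hj
    simp only [List.mem_reverse, List.mem_range] at hj
    rw [Bool.eq_iff_iff]
    simp only [Bool.and_eq_true, decide_eq_true_eq, visB]
    constructor
    · intro h; exact ⟨h i (by omega) hj, fun k hk hjk => h k (by omega) hjk⟩
    · rintro ⟨h1, h2⟩ k hk hjk
      rcases Nat.lt_succ_iff_lt_or_eq.mp hk with h | rfl
      · exact h2 k h hjk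
      · exact h1
  have hdw : (fun j => decide (nlA arr j ≤ nlA arr i)) =
      (fun j => !decide (nlA arr i < nlA arr j)) := by
    funext j; rw [← decide_not]; exact decide_eq_decide.mpr (by omega)
  calc stackChar arr (i + 1)
      = i :: ((List.range i).reverse).filter (visB arr (i+1)) := by
        unfold stackChar; rw [hrev, List.filter_cons, hvi]; simp
    _ = i :: ((List.range i).reverse).filter
          (fun j => decide (nlA arr i < nlA arr j) && visB arr i j) := by
        rw [List.filter_congr hpt]
    _ = i :: (stackChar arr i).filter (fun j => decide (nlA arr i < nlA arr j)) := by
        rw [← List.filter_filter]; rfl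
    _ = _ := by
        rw [filter_eq_dropWhile_of_pairwise
          ((stackChar_pairwise arr i).imp (fun {a b} hab => by
            simp only [decide_eq_true_eq]; omega)), hdw]

-- the recorded stack top equals A's naive leftward scan
theorem popped_head (arr : List Int) (i : Nat) :
    ((stackChar arr i).dropWhile (fun j => decide (nlA arr j ≤ nlA arr i))).head? =
      findL arr i := by
  have hdw : (fun j => decide (nlA arr j ≤ nlA arr i)) =
      (fun j => !decide (nlA arr i < nlA arr j)) := by
    funext j; rw [← decide_not]; exact decide_eq_decide.mpr (by omega)
  rw [hdw, ← filter_eq_dropWhile_of_pairwise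
      ((stackChar_pairwise arr i).imp (fun {a b} hab => by
        simp only [decide_eq_true_eq]; omega)),
    List.head?_filter]
  unfold stackChar
  rw [find?_filter_of_first _ (fun x hx => findL_visible arr i hx)]
  rfl

-- the fold invariant of B's stack pass
theorem pgGo_char (arr : List Int) : ∀ (m i : Nat), i + m = arr.length →
    pgGo arr (arr.drop i) i (stackChar arr i) =
      (List.range' i m).map (fun t => findL arr t) := by
  intro m
  induction m with
  | zero =>
      intro i hi
      rw [List.drop_of_length_le (by omega)]
      rfl
  | succ m ih =>
      intro i hi
      have hilen : i < arr.length := by omega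
      rw [List.drop_eq_getElem_cons hilen]
      have hx : arr[i] = nlA arr i := (List.getD_eq_getElem arr 0 hilen).symm
      show ((stackChar arr i).dropWhile (fun j => decide (arr.getD j 0 ≤ arr[i]))).head? ::
        pgGo arr (arr.drop (i+1)) (i+1)
          (i :: (stackChar arr i).dropWhile (fun j => decide (arr.getD j 0 ≤ arr[i]))) = _
      have hpred : (fun j => decide (arr.getD j 0 ≤ arr[i])) =
          (fun j => decide (nlA arr j ≤ nlA arr i)) := by
        funext j; rw [hx]; rfl
      rw [hpred, ← stackChar_succ, popped_head, ih (i+1) (by omega),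
        List.range'_succ, List.map_cons]

theorem prevGreaterIdx_char (arr : List Int) :
    prevGreaterIdx arr = (List.range arr.length).map (fun t => findL arr t) := by
  have := pgGo_char arr arr.length 0 (by omega)
  simpa [prevGreaterIdx, stackChar, List.range'_eq_map_range, List.map_id'] using this

theorem nlA_reverse (arr : List Int) (k : Nat) (hk : k < arr.length) :
    nlA arr.reverse k = nlA arr (arr.length - 1 - k) := by
  unfold nlA
  rw [List.getD_eq_getElem _ _ (by simpa using hk),
    List.getD_eq_getElem _ _ (by omega), List.getElem_reverse]

theorem range_rev_eq (n i : Nat) (hi : i < n) :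
    (List.range (n - 1 - i)).reverse =
      (List.range' (i + 1) (n - 1 - i)).map (fun j => n - 1 - j) := by
  apply List.ext_getElem
  · simp
  · intro k h1 h2
    simp only [List.getElem_reverse, List.getElem_range, List.getElem_map,
      List.getElem_range', List.length_range] at *
    omega

-- reversed-pass entry ↦ nearest greater to the right
theorem rev_to_right (arr : List Int) (i : Nat) (hi : i < arr.length) :
    (match findL arr.reverse (arr.length - 1 - i) with
     | none => none
     | some j => some (arr.length - 1 - j)) = findR arr i := by
  set n := arr.length with hn
  have h1 : findL arr.reverse (n - 1 - i) =
      Option.map (fun j => n - 1 - j)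
        ((List.range' (i + 1) (n - 1 - i)).find?
          (fun j => decide (nlA arr i < nlA arr j))) := by
    unfold findL
    rw [range_rev_eq n i hi, List.find?_map]
    congr 1
    apply find?_congr_mem
    intro j hj
    simp only [List.mem_range'] at hj
    simp only [Function.comp]
    congr 1
    rw [nlA_reverse arr (n - 1 - j) (by omega), nlA_reverse arr (n - 1 - i) (by omega)]
    have e1 : n - 1 - (n - 1 - j) = j := by omega
    have e2 : n - 1 - (n - 1 - i) = i := by omega
    rw [e1, e2]
  rw [h1]
  unfold findR
  rw [show n - (i + 1) = n - 1 - i from by omega]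
  cases hf : (List.range' (i + 1) (n - 1 - i)).find?
      (fun j => decide (nlA arr i < nlA arr j)) with
  | none => rfl
  | some j =>
      have hjm := List.mem_of_find?_eq_some hf
      simp only [List.mem_range'] at hjm
      simp only [Option.map_some]
      have : n - 1 - (n - 1 - j) = j := by omega
      rw [this]

-- B computes nlEntry at every index
theorem alt_char (arr : List Int) :
    nearest_larger_alt arr = (List.range arr.length).map (nlEntry arr) := by
  unfold nearest_larger_alt
  apply List.map_congr_left
  intro i hi
  rw [List.mem_range] at hi
  rw [prevGreaterIdx_char, PySem.List.getD_map_range _ _ _ _ hi,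
    PySem.List.getD_map_range _ _ _ _ hi]
  rw [prevGreaterIdx_char, List.length_reverse,
    PySem.List.getD_map_range _ _ _ _ (by omega : arr.length - 1 - i < arr.length)]
  rw [rev_to_right arr i hi]
  rfl

-- A's pyRange arguments, as mapped Nat ranges
theorem pyRange_left (i : Nat) :
    PySem.List.pyRange ((i : Int) - 1) (-1) (-1) =
      ((List.range i).reverse).map (fun (j : Nat) => (j : Int)) := by
  rw [PySem.List.pyRange_neg_one]
  apply List.ext_getElem
  · simp
  · intro k h1 h2
    simp only [List.length_map, List.length_range] at h1
    have hk : k < i := by omega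
    rw [List.getElem_map, List.getElem_map, List.getElem_range, List.getElem_reverse,
      List.getElem_range]
    push_cast [List.length_range]
    omega

theorem pyRange_right (i n : Nat) :
    PySem.List.pyRange ((i : Int) + 1) (n : Int) 1 =
      (List.range' (i + 1) (n - (i + 1))).map (fun (j : Nat) => (j : Int)) := by
  apply List.ext_getElem
  · simp [PySem.List.length_pyRange_one]
    omega
  · intro k _ h2
    simp only [List.length_map, List.length_range'] at h2
    rw [PySem.List.getElem_pyRange_one, List.getElem_map, List.getElem_range']
    push_cast
    ring

-- A's break-loops are find? over the same index lists
theorem nlLeftDist_map (arr : List Int) (xi : Int) (ii : Int) (js : List Nat) :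
    nlLeftDist arr xi ii (js.map (fun (j : Nat) => (j : Int))) =
      Option.map (fun (j : Nat) => ii - (j : Int))
        (js.find? (fun j => decide (xi < nlA arr j))) := by
  induction js with
  | nil => rfl
  | cons j rest ih =>
      rw [List.map_cons, List.find?_cons]
      show (if xi < PySem.List.pyGetD arr (j : Int) 0 then _ else _) = _
      rw [PySem.List.pyGetD_natCast]
      by_cases h : xi < arr.getD j 0
      · rw [if_pos h, show (decide (xi < nlA arr j)) = true from decide_eq_true h]
        rfl
      · rw [if_neg h, show (decide (xi < nlA arr j)) = false from decide_eq_false h]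
        exact ih

theorem nlRightDist_map (arr : List Int) (xi : Int) (ii : Int) (js : List Nat) :
    nlRightDist arr xi ii (js.map (fun (j : Nat) => (j : Int))) =
      Option.map (fun (j : Nat) => (j : Int) - ii)
        (js.find? (fun j => decide (xi < nlA arr j))) := by
  induction js with
  | nil => rfl
  | cons j rest ih =>
      rw [List.map_cons, List.find?_cons]
      show (if xi < PySem.List.pyGetD arr (j : Int) 0 then _ else _) = _
      rw [PySem.List.pyGetD_natCast]
      by_cases h : xi < arr.getD j 0
      · rw [if_pos h, show (decide (xi < nlA arr j)) = true from decide_eq_true h]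
        rfl
      · rw [if_neg h, show (decide (xi < nlA arr j)) = false from decide_eq_false h]
        exact ih

-- A computes nlEntry at every index
theorem a_entry (arr : List Int) (i : Nat) (hi : i < arr.length) :
    nlResultAt arr (i : Int) = nlEntry arr i := by
  unfold nlResultAt
  rw [pyRange_left, pyRange_right, PySem.List.pyGetD_natCast]
  simp only [nlLeftDist_map, nlRightDist_map]
  show (match Option.map (fun (j : Nat) => (i : Int) - (j : Int)) (findL arr i),
          Option.map (fun (j : Nat) => (j : Int) - (i : Int)) (findR arr i) with
        | some l, some r =>
            if l ≤ r then PySem.List.pyGetD arr ((i : Int) - l) 0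
            else PySem.List.pyGetD arr ((i : Int) + r) 0
        | some l, none => PySem.List.pyGetD arr ((i : Int) - l) 0
        | none, some r => PySem.List.pyGetD arr ((i : Int) + r) 0
        | none, none => -1) = nlEntry arr i
  unfold nlEntry
  cases hL : findL arr i with
  | none =>
      cases hR : findR arr i with
      | none => rfl
      | some r =>
          rcases findR_bounds arr i hR with ⟨hir, hrn⟩
          simp only [Option.map_none, Option.map_some]
          have : (i : Int) + ((r : Int) - (i : Int)) = (r : Int) := by ring
          rw [this, PySem.List.pyGetD_natCast]
  | some l =>
      have hli := findL_lt arr i hL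
      have hlv : (i : Int) - ((i : Int) - (l : Int)) = (l : Int) := by ring
      cases hR : findR arr i with
      | none =>
          simp only [Option.map_none, Option.map_some]
          rw [hlv, PySem.List.pyGetD_natCast]
      | some r =>
          rcases findR_bounds arr i hR with ⟨hir, hrn⟩
          simp only [Option.map_some]
          have hrv : (i : Int) + ((r : Int) - (i : Int)) = (r : Int) := by ring
          have hcond : ((i : Int) - (l : Int) ≤ (r : Int) - (i : Int)) ↔ (i - l ≤ r - i) := by
            omega
          rw [if_congr hcond (by rw [hlv, PySem.List.pyGetD_natCast])
            (by rw [hrv, PySem.List.pyGetD_natCast])]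

-- ===== VERDICT (by name: the statement is the Claim_ definition above) =====
theorem nearest_larger_spec : Claim_equal_nearest_larger := by
  intro arr _
  unfold Spec_nearest_larger
  show nearest_larger arr = nearest_larger_alt arr
  unfold nearest_larger
  rw [PySem.List.pyRange_zero_natCast, List.map_map, alt_char]
  apply List.map_congr_left
  intro i hi
  rw [List.mem_range] at hi
  exact a_entry arr i hi
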